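-- pv_equiv track=rewrite | github.com/emmenru/last-fm-data | utils/database_helper.py | _find_matching_album_id
-- ===== SOURCE A (Python) =====
-- from typing import Dict, List, Any, Optional, Tuple
--
-- def _find_matching_album_id(
--
--     artist_name: str,
--     album_name: str,
--     id_map: Dict[str, Dict]
-- ) -> Optional[int]:
--     """
--     Try various methods to match an album name to its ID.
--
--     Parameters:
--     -----------
--     artist_name : str
--         Name of the artist
--     album_name : str
--         Name of the album to find
--     id_map : dict
--         Dictionary mapping entity names to their IDs
--
--     Returns:
--     --------
--     int or None
--         Album ID if a match is found, None otherwise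
--     """
--     if not album_name:
--         return None
--
--     # 1. Try exact match first
--     album_key = (artist_name, album_name)
--     if album_key in id_map['albums']:
--         return id_map['albums'][album_key]
--
--     # 2. Try case-insensitive match
--     for (a_name, a_title), a_id in id_map['albums'].items():
--         if a_name.lower() == artist_name.lower() and a_title.lower() == album_name.lower():
--             return a_id
--
--     # 3. Try substring matching
--     for (a_name, a_title), a_id in id_map['albums'].items():
--         if a_name == artist_name:
--             # Check if album_name is contained within a_title or vice versa
--             if album_name.lower() in a_title.lower() or a_title.lower() in album_name.lower():
--                 return a_id
--
--     # No match found
--     return None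
-- ===== SOURCE B (Python) =====
-- def _find_matching_album_id(artist_name, album_name, id_map):
--     """Single-pass re-implementation: after the exact lookup, one loop over the
--     albums maintains two candidate slots (first case-insensitive match, first
--     substring match) instead of A's two separate scans."""
--     if not album_name:
--         return None
--     albums = id_map['albums']
--     key = (artist_name, album_name)
--     if key in albums:
--         return albums[key]
--     al = artist_name.lower()
--     abl = album_name.lower()
--     ci_id = None
--     sub_id = None
--     for (a_name, a_title), a_id in albums.items():
--         tl = a_title.lower()
--         if ci_id is None and a_name.lower() == al and tl == abl:
--             ci_id = a_id
--         if sub_id is None and a_name == artist_name and (abl in tl or tl in abl):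
--             sub_id = a_id
--     return ci_id if ci_id is not None else sub_id
-- ===== Notes on version B (the rewrite author's own statement) =====
-- stated objective: alternative
-- what changed: A's two sequential fallback scans (case-insensitive, then substring) are fused into one traversal that maintains two first-hit candidate slots and picks the case-insensitive one with priority.
import Mathlib
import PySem

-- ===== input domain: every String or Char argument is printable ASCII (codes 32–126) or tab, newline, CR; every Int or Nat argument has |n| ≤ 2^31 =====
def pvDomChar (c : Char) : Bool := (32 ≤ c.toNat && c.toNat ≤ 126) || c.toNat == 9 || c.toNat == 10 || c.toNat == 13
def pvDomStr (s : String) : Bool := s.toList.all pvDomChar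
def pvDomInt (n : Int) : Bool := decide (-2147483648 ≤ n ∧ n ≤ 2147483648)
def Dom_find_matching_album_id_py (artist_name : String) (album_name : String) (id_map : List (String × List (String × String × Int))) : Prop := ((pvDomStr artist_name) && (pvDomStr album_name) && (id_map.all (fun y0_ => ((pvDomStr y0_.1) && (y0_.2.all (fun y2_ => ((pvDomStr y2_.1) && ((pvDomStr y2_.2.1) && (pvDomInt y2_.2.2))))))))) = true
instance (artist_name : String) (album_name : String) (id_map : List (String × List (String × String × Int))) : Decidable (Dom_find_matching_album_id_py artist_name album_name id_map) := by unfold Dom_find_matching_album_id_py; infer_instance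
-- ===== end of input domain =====

-- B fuses A's two fallback scans into a single traversal maintaining two candidate slots; same cost, alternative decomposition.


-- ===== PORT A =====
-- id_map['albums']: first-match association lookup (KeyError case excluded by Pre_)
def pvAlbums (id_map : List (String × List (String × String × Int))) : List (String × String × Int) :=
  ((id_map.find? (fun e => e.1 == "albums")).map (·.2)).getD []

-- loop 2 of A: case-insensitive match, first hit returned
def pvALoop1 (artist_name album_name : String) : List (String × String × Int) → Option Int
  | [] => none
  | (a, t, i) :: rest =>
    if PySem.Str.lower a == PySem.Str.lower artist_name &&
       PySem.Str.lower t == PySem.Str.lower album_name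
    then some i else pvALoop1 artist_name album_name rest

-- loop 3 of A: substring match under exact artist, first hit returned
def pvALoop2 (artist_name album_name : String) : List (String × String × Int) → Option Int
  | [] => none
  | (a, t, i) :: rest =>
    if a == artist_name then
      if PySem.Str.isIn (PySem.Str.lower album_name) (PySem.Str.lower t) ||
         PySem.Str.isIn (PySem.Str.lower t) (PySem.Str.lower album_name)
      then some i else pvALoop2 artist_name album_name rest
    else pvALoop2 artist_name album_name rest

def find_matching_album_id_py (artist_name : String) (album_name : String) (id_map : List (String × List (String × String × Int))) : Option Int :=
  if album_name == "" then none
  else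
    match (pvAlbums id_map).find? (fun e => e.1 == artist_name && e.2.1 == album_name) with
    | some e => some e.2.2
    | none =>
      match pvALoop1 artist_name album_name (pvAlbums id_map) with
      | some i => some i
      | none => pvALoop2 artist_name album_name (pvAlbums id_map)

-- ===== PORT B =====
-- B's single pass: two first-hit candidate slots (ci = case-insensitive, sub = substring);
-- Source B's hoisted lowercased inputs are the al/abl parameters
def pvBLoop (artist_name al abl : String) (ci sub : Option Int) : List (String × String × Int) → Option Int × Option Int
  | [] => (ci, sub)
  | (a, t, i) :: rest =>
    let tl := PySem.Str.lower t
    let ci' := if ci.isNone && (PySem.Str.lower a == al) && (tl == abl) then some i else ci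
    let sub' := if sub.isNone && (a == artist_name) &&
                   (PySem.Str.isIn abl tl || PySem.Str.isIn tl abl) then some i else sub
    pvBLoop artist_name al abl ci' sub' rest

def find_matching_album_id_py_alt (artist_name : String) (album_name : String) (id_map : List (String × List (String × String × Int))) : Option Int :=
  if album_name == "" then none
  else
    match (pvAlbums id_map).find? (fun e => e.1 == artist_name && e.2.1 == album_name) with
    | some e => some e.2.2
    | none =>
      match pvBLoop artist_name (PySem.Str.lower artist_name) (PySem.Str.lower album_name) none none (pvAlbums id_map) with
      | (some i, _) => some i
      | (none, sub) => sub

-- ===== PRECONDITION & SPEC =====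
-- Pre_ excludes only the inputs where A raises KeyError: album_name non-empty but no 'albums' key in id_map.
def Pre_find_matching_album_id_py (artist_name : String) (album_name : String) (id_map : List (String × List (String × String × Int))) : Prop :=
  album_name = "" ∨ "albums" ∈ id_map.map (·.1)
instance (artist_name : String) (album_name : String) (id_map : List (String × List (String × String × Int))) : Decidable (Pre_find_matching_album_id_py artist_name album_name id_map) := by unfold Pre_find_matching_album_id_py; infer_instance

def pvWitness_find_matching_album_id_py : String × String × (List (String × List (String × String × Int))) :=
  ("x", "y", [("albums", [("x", "z", 1)])])

def Spec_find_matching_album_id_py (artist_name : String) (album_name : String) (id_map : List (String × List (String × String × Int))) (out : Option Int) : Prop := out = find_matching_album_id_py_alt artist_name album_name id_map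
instance (artist_name : String) (album_name : String) (id_map : List (String × List (String × String × Int))) (out : Option Int) : Decidable (Spec_find_matching_album_id_py artist_name album_name id_map out) := by unfold Spec_find_matching_album_id_py; infer_instance

-- ===== CLAIM (what is proved, stated in full; the proofs are below) =====
def Claim_equal_find_matching_album_id_py : Prop := ∀ (artist_name : String) (album_name : String) (id_map : List (String × List (String × String × Int))), Dom_find_matching_album_id_py artist_name album_name id_map → Pre_find_matching_album_id_py artist_name album_name id_map → Spec_find_matching_album_id_py artist_name album_name id_map (find_matching_album_id_py artist_name album_name id_map)

-- ===== LEMMAS AND PROOFS =====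
lemma pvALoop2_cons (artist_name album_name a t : String) (i : Int) (rest : List (String × String × Int)) :
    pvALoop2 artist_name album_name ((a, t, i) :: rest) =
      if (a == artist_name) &&
         (PySem.Str.isIn (PySem.Str.lower album_name) (PySem.Str.lower t) ||
          PySem.Str.isIn (PySem.Str.lower t) (PySem.Str.lower album_name))
      then some i else pvALoop2 artist_name album_name rest := by
  cases h1 : (a == artist_name) <;> simp [pvALoop2, h1]

lemma pvBLoop_eq (artist_name album_name : String) (ci sub : Option Int) (l : List (String × String × Int)) :
    pvBLoop artist_name (PySem.Str.lower artist_name) (PySem.Str.lower album_name) ci sub l =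
      (ci.or (pvALoop1 artist_name album_name l), sub.or (pvALoop2 artist_name album_name l)) := by
  induction l generalizing ci sub with
  | nil => simp [pvBLoop, pvALoop1, pvALoop2]
  | cons hd rest ih =>
    obtain ⟨a, t, i⟩ := hd
    cases ci <;> cases sub <;>
      simp [pvBLoop, pvALoop1, pvALoop2_cons, ih] <;> split_ifs <;> simp_all

lemma pvMainCore (artist_name album_name : String) (albums : List (String × String × Int)) :
    (match pvBLoop artist_name (PySem.Str.lower artist_name) (PySem.Str.lower album_name) none none albums with
     | (some i, _) => some i
     | (none, sub) => sub) =
      (match pvALoop1 artist_name album_name albums with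
       | some i => some i
       | none => pvALoop2 artist_name album_name albums) := by
  rw [pvBLoop_eq]
  cases h1 : pvALoop1 artist_name album_name albums <;> simp [Option.or]

-- ===== VERDICT (by name: the statement is the Claim_ definition above) =====
theorem find_matching_album_id_py_spec : Claim_equal_find_matching_album_id_py := by
  intro artist_name album_name id_map _dom _pre
  unfold Spec_find_matching_album_id_py find_matching_album_id_py find_matching_album_id_py_alt
  cases hb : (album_name == "")
  · simp only [Bool.false_eq_true, if_false]
    cases hf : (pvAlbums id_map).find? (fun e => e.1 == artist_name && e.2.1 == album_name) <;>
      simp only []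
    · exact (pvMainCore artist_name album_name (pvAlbums id_map)).symm
  · simp
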